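-- pv_equiv track=rewrite | github.com/umangmittal24MAQ/Energy_agent_final | server/app/services/scheduler_service.py | _normalize_scheduler_recipients
-- ===== SOURCE A (Python) =====
-- from typing import Dict, Any, Optional
--
-- def _split_emails(value: Any) -> list[str]:
--     """Split comma/semicolon-separated email strings into clean tokens."""
--     if value is None:
--         return []
--     if isinstance(value, list):
--         raw_items = value
--     else:
--         raw_items = str(value).replace(";", ",").split(",")
--     return [str(item).strip() for item in raw_items if str(item).strip()]
--
-- def _dedupe_emails(emails: list[str]) -> list[str]:
--     """Deduplicate emails while preserving original order and casing."""
--     unique: list[str] = []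
--     seen: set[str] = set()
--     for email in emails:
--         key = email.lower()
--         if key in seen:
--             continue
--         seen.add(key)
--         unique.append(email)
--     return unique
--
-- def _normalize_scheduler_recipients(config: Dict[str, Any]) -> Dict[str, Any]:
--     """Normalize configured recipients while preserving scheduler-config values only."""
--     normalized = dict(config or {})
--
--     merged_to = _dedupe_emails(_split_emails(normalized.get("to", "")))
--     merged_cc = _dedupe_emails(_split_emails(normalized.get("cc", "")))
--
--     to_keys = {email.lower() for email in merged_to}
--     merged_cc = [email for email in merged_cc if email.lower() not in to_keys]
--
--     normalized["to"] = ",".join(merged_to)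
--     normalized["cc"] = ",".join(merged_cc)
--     return normalized
-- ===== SOURCE B (Python) =====
-- from typing import Dict, Any
--
-- def _split_emails(value: Any) -> list[str]:
--     """Split comma/semicolon-separated email strings into clean tokens."""
--     if value is None:
--         return []
--     if isinstance(value, list):
--         raw_items = value
--     else:
--         raw_items = str(value).replace(";", ",").split(",")
--     return [str(item).strip() for item in raw_items if str(item).strip()]
--
-- def _first_occurrences(tokens: list[str]) -> list[str]:
--     """Keep first occurrences (case-insensitive) by repeatedly taking the head
--     and dropping all its later case-insensitive duplicates."""
--     out: list[str] = []
--     pending = list(tokens)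
--     while pending:
--         head = pending[0]
--         out.append(head)
--         hl = head.lower()
--         pending = [t for t in pending[1:] if t.lower() != hl]
--     return out
--
-- def _normalize_scheduler_recipients(config: Dict[str, Any]) -> Dict[str, Any]:
--     """Normalize configured recipients while preserving scheduler-config values only."""
--     normalized = dict(config or {})
--     to_tokens = _split_emails(normalized.get("to", ""))
--     cc_tokens = _split_emails(normalized.get("cc", ""))
--     to_lowers = [t.lower() for t in to_tokens]
--     normalized["to"] = ",".join(_first_occurrences(to_tokens))
--     normalized["cc"] = ",".join(_first_occurrences(
--         [e for e in cc_tokens if e.lower() not in to_lowers]))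
--     return normalized
-- ===== Notes on version B (the rewrite author's own statement) =====
-- stated objective: alternative
-- what changed: A dedupes with a seen-set accumulator in two passes and then filters the deduped cc against a set of lowered to-keys; B filters the cc tokens against the raw to-lowers up front and dedupes both lists by a head-and-drop-later-duplicates elimination loop that carries no seen-set at all.
import Mathlib
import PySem

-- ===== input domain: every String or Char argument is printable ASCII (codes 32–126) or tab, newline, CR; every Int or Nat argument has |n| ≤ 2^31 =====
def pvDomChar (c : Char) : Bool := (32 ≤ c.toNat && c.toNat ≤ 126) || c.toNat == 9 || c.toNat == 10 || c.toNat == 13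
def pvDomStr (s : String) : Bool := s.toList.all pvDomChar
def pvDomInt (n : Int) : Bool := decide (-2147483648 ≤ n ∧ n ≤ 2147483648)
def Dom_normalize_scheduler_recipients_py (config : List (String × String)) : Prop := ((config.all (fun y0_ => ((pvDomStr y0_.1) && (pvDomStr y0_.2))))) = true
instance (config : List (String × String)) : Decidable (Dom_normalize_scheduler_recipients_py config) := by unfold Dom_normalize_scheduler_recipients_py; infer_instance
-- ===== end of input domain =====

-- B replaces A's two seen-set dedupe passes plus cc-filter with an up-front filter of the cc
-- tokens against the raw to-lowers and a head-and-drop-later-duplicates elimination loop with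
-- no seen-set (objective: alternative; same return value).

-- ===== PORT A =====
-- shared helper: _split_emails (textually identical in Source A and Source B; value is a string here,
-- so the None/list branches are dead; '.getD []' totalizes split?, whose none case (sep = "")
-- is unreachable for the literal separator ",")
def pvSplitEmails (value : String) : List String :=
  let rawItems := (PySem.Str.split? (PySem.Str.replace value ";" ",") ",").getD []
  (rawItems.map PySem.Str.strip).filter (fun s => !(s == ""))

-- _dedupe_emails: for-loop over emails with state (unique, seen)
def pvDedupeEmails (emails : List String) : List String :=
  (emails.foldl
    (fun (st : List String × PySem.Set String) email =>
      let key := PySem.Str.lower email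
      if PySem.Set.contains st.2 key then st
      else (st.1 ++ [email], PySem.Set.add st.2 key))
    ([], PySem.Set.empty)).1

def normalize_scheduler_recipients_py (config : List (String × String)) : List (String × String) :=
  let normalized := PySem.Dict.ofList config
  let mergedTo := pvDedupeEmails (pvSplitEmails (normalized.getD "to" ""))
  let mergedCc := pvDedupeEmails (pvSplitEmails (normalized.getD "cc" ""))
  let toKeys := PySem.Set.ofList (mergedTo.map PySem.Str.lower)
  let mergedCc2 := mergedCc.filter (fun email => !(PySem.Set.contains toKeys (PySem.Str.lower email)))
  (((normalized.insert "to" (PySem.Str.join "," mergedTo)).insert "cc" (PySem.Str.join "," mergedCc2))).items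

-- ===== PORT B =====
-- _first_occurrences: the while-loop over `pending` becomes recursion on `pending`
-- (each round emits the head and drops its later case-insensitive duplicates)
def pvFirstOccurrences : List String → List String
  | [] => []
  | head :: rest =>
    head :: pvFirstOccurrences (rest.filter (fun t => !(PySem.Str.lower t == PySem.Str.lower head)))
termination_by l => l.length
decreasing_by
  simp only [List.length_cons, List.length_unattach]
  exact Nat.lt_succ_of_le (le_trans (List.length_filter_le _ _) (by simp))

def normalize_scheduler_recipients_py_alt (config : List (String × String)) : List (String × String) :=
  let normalized := PySem.Dict.ofList config
  let toTokens := pvSplitEmails (normalized.getD "to" "")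
  let ccTokens := pvSplitEmails (normalized.getD "cc" "")
  let toLowers := toTokens.map PySem.Str.lower
  (((normalized.insert "to" (PySem.Str.join "," (pvFirstOccurrences toTokens))).insert "cc"
    (PySem.Str.join "," (pvFirstOccurrences
      (ccTokens.filter (fun e => !(toLowers.contains (PySem.Str.lower e)))))))).items

-- ===== PRECONDITION & SPEC =====
def Spec_normalize_scheduler_recipients_py (config : List (String × String)) (out : List (String × String)) : Prop := out = normalize_scheduler_recipients_py_alt config
instance (config : List (String × String)) (out : List (String × String)) : Decidable (Spec_normalize_scheduler_recipients_py config out) := by unfold Spec_normalize_scheduler_recipients_py; infer_instance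

-- ===== CLAIM (what is proved, stated in full; the proofs are below) =====
def Claim_equal_normalize_scheduler_recipients_py : Prop := ∀ (config : List (String × String)), Dom_normalize_scheduler_recipients_py config → Spec_normalize_scheduler_recipients_py config (normalize_scheduler_recipients_py config)

-- ===== LEMMAS AND PROOFS =====

-- the loop body of A's dedupe
def pvStep (st : List String × PySem.Set String) (email : String) :
    List String × PySem.Set String :=
  let key := PySem.Str.lower email
  if PySem.Set.contains st.2 key then st
  else (st.1 ++ [email], PySem.Set.add st.2 key)

theorem pvStep_of_mem (acc : List String) (s : PySem.Set String) (e : String)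
    (h : PySem.Set.contains s (PySem.Str.lower e) = true) :
    pvStep (acc, s) e = (acc, s) := by
  have hm : PySem.Str.lower e ∈ s := (PySem.Set.contains_iff _ _).1 h
  simp [pvStep, hm]

theorem pvStep_of_not_mem (acc : List String) (s : PySem.Set String) (e : String)
    (h : PySem.Set.contains s (PySem.Str.lower e) = false) :
    pvStep (acc, s) e = (acc ++ [e], PySem.Set.add s (PySem.Str.lower e)) := by
  have hm : PySem.Str.lower e ∉ s := by rw [← PySem.Set.contains_iff, h]; simp
  simp [pvStep, hm]

theorem pvContains_add (s : PySem.Set String) (k k' : String) :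
    PySem.Set.contains (PySem.Set.add s k) k'
      = (PySem.Set.contains s k' || (k' == k)) := by
  rw [Bool.eq_iff_iff, PySem.Set.contains_iff, PySem.Set.mem_add, Bool.or_eq_true,
    PySem.Set.contains_iff, beq_iff_eq]

-- A's seen-set fold computes B's elimination loop on the tokens not yet seen
theorem pvFold_eq_fo (l : List String) (acc : List String) (s : PySem.Set String) :
    (l.foldl pvStep (acc, s)).1
      = acc ++ pvFirstOccurrences
          (l.filter (fun t => !(PySem.Set.contains s (PySem.Str.lower t)))) := by
  induction l generalizing acc s with
  | nil => simp [pvFirstOccurrences.eq_1]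
  | cons e l ih =>
    rw [List.foldl_cons, List.filter_cons]
    cases h : PySem.Set.contains s (PySem.Str.lower e) with
    | true =>
      rw [pvStep_of_mem _ _ _ h]
      simpa using ih acc s
    | false =>
      rw [pvStep_of_not_mem _ _ _ h]
      rw [ih (acc ++ [e]) (PySem.Set.add s (PySem.Str.lower e))]
      simp only [Bool.not_false, if_pos]
      rw [pvFirstOccurrences.eq_2, List.filter_filter]
      rw [List.filter_congr (fun t _ => ?_), List.append_assoc, List.singleton_append]
      rw [pvContains_add]
      cases PySem.Set.contains s (PySem.Str.lower t) <;>
        cases hx : (PySem.Str.lower t == PySem.Str.lower e) <;> simp [hx]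

theorem pvDedupe_eq_fo (l : List String) :
    pvDedupeEmails l = pvFirstOccurrences l := by
  have h := pvFold_eq_fo l [] PySem.Set.empty
  have hf : (l.filter (fun t => !(PySem.Set.contains PySem.Set.empty (PySem.Str.lower t)))) = l := by
    apply List.filter_eq_self.2
    intro t _
    have : PySem.Str.lower t ∉ (PySem.Set.empty : PySem.Set String) := by simp [PySem.Set.empty]
    simp [← Bool.not_eq_true, PySem.Set.contains_iff]
  rw [hf] at h
  unfold pvDedupeEmails
  exact h

-- lowered members of the deduped list = lowered members of the original list
theorem pvFo_lowers (l : List String) (k : String) :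
    k ∈ (pvFirstOccurrences l).map PySem.Str.lower ↔ k ∈ l.map PySem.Str.lower := by
  induction l using pvFirstOccurrences.induct with
  | case1 => simp [pvFirstOccurrences.eq_1]
  | case2 head rest ih =>
    simp only [List.unattach_filter, List.unattach_attach] at ih
    rw [pvFirstOccurrences.eq_2, List.map_cons, List.map_cons, List.mem_cons, List.mem_cons, ih]
    by_cases hk : k = PySem.Str.lower head
    · subst hk; simp
    · simp only [List.mem_map, List.mem_filter]
      constructor
      · rintro (h1 | ⟨t, ⟨ht, _⟩, rfl⟩)
        · exact Or.inl h1
        · exact Or.inr ⟨t, ht, rfl⟩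
      · rintro (h1 | ⟨t, ht, rfl⟩)
        · exact Or.inl h1
        · refine Or.inr ⟨t, ⟨ht, ?_⟩, rfl⟩
          simpa using fun hc => hk hc

-- a filter on a lower-stable predicate commutes with the elimination loop
theorem pvFo_filter (p : String → Bool)
    (hp : ∀ a b, PySem.Str.lower a = PySem.Str.lower b → p a = p b) (l : List String) :
    (pvFirstOccurrences l).filter p = pvFirstOccurrences (l.filter p) := by
  induction l using pvFirstOccurrences.induct with
  | case1 => simp [pvFirstOccurrences.eq_1]
  | case2 head rest ih =>
    simp only [List.unattach_filter, List.unattach_attach] at ih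
    rw [pvFirstOccurrences.eq_2, List.filter_cons]
    cases hh : p head with
    | true =>
      simp only [if_pos]
      rw [List.filter_cons, hh, if_pos rfl, pvFirstOccurrences.eq_2, ih, List.filter_filter,
        List.filter_filter]
      congr 1
      refine congrArg pvFirstOccurrences (List.filter_congr ?_)
      intro t _
      cases p t <;> simp
    | false =>
      simp only [Bool.false_eq_true, ih]
      rw [List.filter_cons, hh, if_neg (by simp), List.filter_filter]
      congr 1
      apply List.filter_congr
      intro t _
      cases hq : (PySem.Str.lower t == PySem.Str.lower head) with
      | true =>
        have : p t = p head := hp t head (by simpa using hq)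
        simp [this, hh]
      | false => simp

-- A's filter of the deduped cc against the deduped to-keys = B's dedupe of the pre-filtered cc
theorem pvCc_eq (lto lcc : List String) :
    (pvFirstOccurrences lcc).filter
        (fun email => !(PySem.Set.contains
          (PySem.Set.ofList ((pvFirstOccurrences lto).map PySem.Str.lower))
          (PySem.Str.lower email)))
      = pvFirstOccurrences
          (lcc.filter (fun e => !((lto.map PySem.Str.lower).contains (PySem.Str.lower e)))) := by
  rw [pvFo_filter _ (fun a b hab => by simp only [hab]) lcc]
  congr 1
  apply List.filter_congr
  intro e _
  congr 1
  rw [Bool.eq_iff_iff, PySem.Set.contains_iff, PySem.Set.mem_ofList, pvFo_lowers,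
    List.contains_iff_mem]

-- ===== VERDICT (by name: the statement is the Claim_ definition above) =====
theorem normalize_scheduler_recipients_py_spec : Claim_equal_normalize_scheduler_recipients_py := by
  intro config _
  unfold Spec_normalize_scheduler_recipients_py
  unfold normalize_scheduler_recipients_py normalize_scheduler_recipients_py_alt
  simp only [pvDedupe_eq_fo, pvCc_eq]
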